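-- pv_equiv track=rewrite | github.com/Ya-kuku/Algorithm_practice | 프로그래머스/위장.py | solution
-- ===== SOURCE A (Python) =====
-- def solution(clothes):
--     answer = {}
--     ans = 1
--     for i in clothes:
--         if i[1] in answer: answer[i[1]] += 1
--         else: answer[i[1]] = 1
--     for i in answer.values():
--         ans *= (i+1)
--     return ans - 1
-- ===== SOURCE B (Python) =====
-- def solution(clothes):
--     # Recursive partition: peel off the first item's category, count its
--     # occurrences, recurse on the remaining categories. No dict is built.
--     if not clothes:
--         return 0
--     cat = clothes[0][1]
--     cnt = sum(1 for c in clothes if c[1] == cat)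
--     rest = [c for c in clothes if c[1] != cat]
--     return (cnt + 1) * (solution(rest) + 1) - 1
-- ===== Notes on version B (the rewrite author's own statement) =====
-- stated objective: alternative
-- what changed: Replaces A's dict frequency counter followed by a product over its values with a direct recursion that partitions the list by the first item's category (count it, filter it out, recurse); no dict is built.
import Mathlib
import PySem

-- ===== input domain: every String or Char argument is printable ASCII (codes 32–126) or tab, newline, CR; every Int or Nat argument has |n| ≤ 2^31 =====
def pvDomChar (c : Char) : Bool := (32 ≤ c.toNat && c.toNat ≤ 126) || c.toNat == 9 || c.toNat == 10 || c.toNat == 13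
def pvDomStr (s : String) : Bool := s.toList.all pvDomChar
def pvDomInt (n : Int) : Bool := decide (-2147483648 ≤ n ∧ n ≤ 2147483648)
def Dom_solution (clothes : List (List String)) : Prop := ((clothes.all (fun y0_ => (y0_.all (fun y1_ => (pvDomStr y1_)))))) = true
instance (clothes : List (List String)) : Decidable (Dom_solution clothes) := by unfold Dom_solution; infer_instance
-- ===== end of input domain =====

-- B replaces A's dict frequency counter with a direct recursion that partitions the
-- list by the first item's category (alternative decomposition; no dict is built).

-- ===== PORT A =====
def solution (clothes : List (List String)) : Int :=
  let answer : PySem.Dict String Int :=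
    clothes.foldl (fun d i =>
      let k := (PySem.List.pyGet? i 1).getD ""   -- i[1]; total under Pre_ (len ≥ 2)
      match d.get? k with
      | some v => d.insert k (v + 1)             -- answer[i[1]] += 1
      | none   => d.insert k 1)                  -- answer[i[1]] = 1
      PySem.Dict.empty
  let ans := answer.values.foldl (fun a i => a * (i + 1)) 1
  ans - 1

-- ===== PORT B =====
def solution_alt : List (List String) → Int
  | [] => 0
  | x :: xs =>
    let cat := (PySem.List.pyGet? x 1).getD ""   -- clothes[0][1]; total under Pre_
    ((((x :: xs).countP (fun c => (PySem.List.pyGet? c 1).getD "" == cat) : Nat) : Int) + 1)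
      * (solution_alt ((x :: xs).filter (fun c => !((PySem.List.pyGet? c 1).getD "" == cat))) + 1)
      - 1
termination_by l => l.length
decreasing_by
  simp only [List.filter_cons, beq_self_eq_true, Bool.not_true, Bool.false_eq_true, if_false,
    List.length_cons]
  exact Nat.lt_succ_of_le (List.length_filter_le _ _)

-- ===== PRECONDITION & SPEC =====
-- Pre_ excludes inputs with an element of length < 2, on which Python A raises IndexError (i[1]).
def Pre_solution (clothes : List (List String)) : Prop := ∀ i ∈ clothes, 2 ≤ i.length
instance (clothes : List (List String)) : Decidable (Pre_solution clothes) := by unfold Pre_solution; infer_instance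
def pvWitness_solution : List (List String) :=
  [["a", "headgear"], ["b", "headgear"], ["c", "eyewear"]]
def Spec_solution (clothes : List (List String)) (out : Int) : Prop := out = solution_alt clothes
instance (clothes : List (List String)) (out : Int) : Decidable (Spec_solution clothes out) := by unfold Spec_solution; infer_instance

-- ===== CLAIM (what is proved, stated in full; the proofs are below) =====
def Claim_equal_solution : Prop := ∀ (clothes : List (List String)), Dom_solution clothes → Pre_solution clothes → Spec_solution clothes (solution clothes)

-- ===== LEMMAS AND PROOFS =====

-- the category key of one garment, as both ports read it
def pvKey (c : List String) : String := (PySem.List.pyGet? c 1).getD ""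

-- the common closed form both ports are reduced to
def pvProd (ks : List String) : Int :=
  ((PySem.Set.ofList ks).map (fun k => ((ks.count k : Nat) : Int) + 1)).prod

theorem pv_foldl_mul (l : List Int) (c : Int) :
    l.foldl (fun a i => a * (i + 1)) c = c * (l.map (fun i => i + 1)).prod := by
  induction l generalizing c with
  | nil => simp
  | cons h t ih => simp [List.foldl_cons, ih, mul_assoc]

theorem pv_solution_eq (clothes : List (List String)) :
    solution clothes = pvProd (clothes.map pvKey) - 1 := by
  have hstep : (fun (d : PySem.Dict String Int) (i : List String) =>
      let k := (PySem.List.pyGet? i 1).getD ""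
      match d.get? k with
      | some v => d.insert k (v + 1)
      | none   => d.insert k 1)
      = fun d i => d.insert (pvKey i) (d.getD (pvKey i) 0 + 1) := by
    funext d i
    show (match d.get? (pvKey i) with
       | some v => d.insert (pvKey i) (v + 1)
       | none   => d.insert (pvKey i) 1) = _
    cases h : d.get? (pvKey i) <;> simp [PySem.Dict.getD, h]
  unfold solution
  rw [hstep]
  have hfold : clothes.foldl
      (fun d i => d.insert (pvKey i) (d.getD (pvKey i) 0 + 1)) PySem.Dict.empty
      = PySem.Dict.counter (clothes.map pvKey) := by
    rw [← PySem.Dict.foldl_insert_getD_add_one_eq_counter, List.foldl_map]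
  rw [hfold]
  show (PySem.Dict.counter (List.map pvKey clothes)).values.foldl (fun a i => a * (i + 1)) 1 - 1
      = pvProd (List.map pvKey clothes) - 1
  rw [pv_foldl_mul]
  have hvals : (PySem.Dict.counter (clothes.map pvKey)).values
      = (PySem.Set.ofList (clothes.map pvKey)).map
          (fun k => (((clothes.map pvKey).count k : Nat) : Int)) := by
    simp only [PySem.Dict.values, PySem.Dict.items_counter, List.map_map]
    rfl
  rw [hvals, pvProd, List.map_map]
  simp [Function.comp_def]

theorem pv_prod_cons (k : String) (t : List String) :
    pvProd (k :: t) = ((((k :: t).count k : Nat) : Int) + 1)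
      * pvProd ((k :: t).filter (fun j => !(j == k))) := by
  set rs := (k :: t).filter (fun j => !(j == k)) with hrs
  have hmem_rs : ∀ j, j ∈ rs ↔ j ∈ (k :: t) ∧ j ≠ k := by
    intro j
    rw [hrs, List.mem_filter]
    simp
  have hknot : k ∉ PySem.Set.ofList rs := fun h =>
    ((hmem_rs k).1 ((PySem.Set.mem_ofList _ _).1 h)).2 rfl
  have hperm : (PySem.Set.ofList (k :: t)).Perm (k :: PySem.Set.ofList rs) := by
    refine (List.perm_ext_iff_of_nodup (PySem.Set.nodup_ofList _) ?_).2 ?_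
    · exact List.nodup_cons.2 ⟨hknot, PySem.Set.nodup_ofList _⟩
    · intro j
      simp only [PySem.Set.mem_ofList, List.mem_cons, hmem_rs]
      by_cases hj : j = k <;> simp [hj]
  have hcount : ∀ j ∈ PySem.Set.ofList rs,
      ((k :: t).count j : Nat) = (rs.count j : Nat) := by
    intro j hj
    have hjk : j ≠ k := ((hmem_rs j).1 ((PySem.Set.mem_ofList _ _).1 hj)).2
    rw [hrs, List.count_filter]
    simp [hjk]
  calc pvProd (k :: t)
      = ((k :: PySem.Set.ofList rs).map
          (fun j => (((k :: t).count j : Nat) : Int) + 1)).prod :=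
        (hperm.map (fun j => (((k :: t).count j : Nat) : Int) + 1)).prod_eq
    _ = ((((k :: t).count k : Nat) : Int) + 1)
        * ((PySem.Set.ofList rs).map
            (fun j => (((k :: t).count j : Nat) : Int) + 1)).prod := by
        rw [List.map_cons, List.prod_cons]
    _ = _ := by
        rw [pvProd]
        have hmaps : (PySem.Set.ofList rs).map (fun j => (((k :: t).count j : Nat) : Int) + 1)
            = (PySem.Set.ofList rs).map (fun j => ((rs.count j : Nat) : Int) + 1) :=
          List.map_congr_left fun j hj => by rw [hcount j hj]
        rw [hmaps]

theorem pv_alt_eq : ∀ (n : Nat) (clothes : List (List String)), clothes.length ≤ n →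
    solution_alt clothes = pvProd (clothes.map pvKey) - 1 := by
  intro n
  induction n with
  | zero =>
    intro clothes h
    have : clothes = [] := List.eq_nil_of_length_eq_zero (Nat.le_zero.1 h)
    subst this
    unfold solution_alt
    simp [pvProd, PySem.Set.ofList]
  | succ n ih =>
    intro clothes h
    match clothes with
    | [] =>
      unfold solution_alt
      simp [pvProd, PySem.Set.ofList]
    | x :: xs =>
      rw [solution_alt]
      set cat := (PySem.List.pyGet? x 1).getD "" with hcat
      set rest := (x :: xs).filter (fun c => !((PySem.List.pyGet? c 1).getD "" == cat)) with hrest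
      have hrlen : rest.length ≤ n := by
        have : rest = xs.filter (fun c => !((PySem.List.pyGet? c 1).getD "" == cat)) := by
          rw [hrest, List.filter_cons]
          simp [hcat]
        rw [this]
        exact Nat.le_trans (List.length_filter_le _ _) (Nat.le_of_succ_le_succ h)
      have hmapfilter : rest.map pvKey = ((x :: xs).map pvKey).filter (fun j => !(j == cat)) := by
        rw [hrest, List.filter_map]
        rfl
      have hcnt : (x :: xs).countP (fun c => (PySem.List.pyGet? c 1).getD "" == cat)
          = ((x :: xs).map pvKey).count cat := by
        rw [List.count, List.countP_map]
        rfl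
      have hhead : (x :: xs).map pvKey = cat :: xs.map pvKey := by
        simp [pvKey, hcat]
      rw [ih rest hrlen, hcnt, hmapfilter, hhead]
      rw [pv_prod_cons cat (xs.map pvKey)]
      ring

-- ===== VERDICT (by name: the statement is the Claim_ definition above) =====
theorem solution_spec : Claim_equal_solution := by
  intro clothes _ _
  unfold Spec_solution
  rw [pv_solution_eq, pv_alt_eq clothes.length clothes (le_refl _)]
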